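-- pv_equiv track=rewrite | github.com/MontyPython-ManuL/Collection_framework | anagrams/func_reverse.py | compact_word
-- ===== SOURCE A (Python) =====
-- def compact_word(word):
--     result = []
--     alfa_iter = iter([char for char in word[::-1] if char.isalpha()])
--     for letter in word:
--         if letter.isalpha():
--             result.append(next(alfa_iter))
--         else:
--             result.append(letter)
--     return ''.join(result)
-- ===== SOURCE B (Python) =====
-- def compact_word(word):
--     # Converging two-index loop: skip non-letters on either end, otherwise
--     # exchange the two boundary letters; no reversed/filtered pre-pass.
--     xs = list(word)
--     i, j = 0, len(xs) - 1
--     front, back = [], []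
--     while i < j:
--         if not xs[i].isalpha():
--             front.append(xs[i])
--             i += 1
--         elif not xs[j].isalpha():
--             back.append(xs[j])
--             j -= 1
--         else:
--             front.append(xs[j])
--             back.append(xs[i])
--             i += 1
--             j -= 1
--     return ''.join(front + xs[i:j+1] + back[::-1])
-- ===== Notes on version B (the rewrite author's own statement) =====
-- stated objective: alternative
-- what changed: Replaced the reversed-filtered-iterator forward pass with a converging two-index loop that skips non-letters at either end and exchanges the two boundary letters, assembling the result from a front part, the untouched middle slice, and a reversed back part.
import Mathlib
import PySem

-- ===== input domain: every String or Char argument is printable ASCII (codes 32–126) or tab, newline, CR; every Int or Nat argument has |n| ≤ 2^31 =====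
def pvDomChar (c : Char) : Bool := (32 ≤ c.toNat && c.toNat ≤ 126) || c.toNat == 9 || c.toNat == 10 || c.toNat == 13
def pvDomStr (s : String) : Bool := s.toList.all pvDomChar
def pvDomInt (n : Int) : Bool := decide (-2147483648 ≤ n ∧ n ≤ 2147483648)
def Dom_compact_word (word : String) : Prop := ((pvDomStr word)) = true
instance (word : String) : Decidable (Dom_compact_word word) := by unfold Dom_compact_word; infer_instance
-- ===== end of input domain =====

-- B replaces A's reversed-filtered-iterator forward pass by a converging-ends loop (alternative, same O(n) cost).

-- ===== PORT A =====
-- the for-loop of A: walk the word, consuming the next reversed letter at each alpha position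
def pvGoA : List Char → List Char → List Char
  | [], _ => []
  | c :: cs, L =>
    if PySem.Chars.isalpha c then
      match L with
      | a :: L' => a :: pvGoA cs L'
      | [] => pvGoA cs []   -- unreachable: the iterator holds exactly one letter per alpha position
    else c :: pvGoA cs L

def compact_word (word : String) : String :=
  -- word[::-1] is the reversal of the character list (exact)
  String.mk (pvGoA word.toList ((word.toList.reverse).filter (fun c => PySem.Chars.isalpha c)))

-- ===== PORT B =====
-- the while-loop of B over (i, j, front, back); xs stays fixed
def pvLoopB (xs : List Char) (i j : Int) (front back : List Char) : List Char :=
  if _h : i < j then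
    -- xs[i] / xs[j]: always in range when the loop body runs (0 ≤ i < j ≤ len - 1 from the call site)
    let ci := (PySem.List.pyGet? xs i).getD ' '
    let cj := (PySem.List.pyGet? xs j).getD ' '
    if ¬ PySem.Chars.isalpha ci then pvLoopB xs (i + 1) j (front ++ [ci]) back
    else if ¬ PySem.Chars.isalpha cj then pvLoopB xs i (j - 1) front (back ++ [cj])
    else pvLoopB xs (i + 1) (j - 1) (front ++ [cj]) (back ++ [ci])
  else front ++ PySem.List.slice xs (some i) (some (j + 1)) ++ back.reverse
  termination_by (j - i).toNat
  decreasing_by all_goals omega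

def compact_word_alt (word : String) : String :=
  String.mk (pvLoopB word.toList 0 ((word.toList.length : Int) - 1) [] [])

-- ===== PRECONDITION & SPEC =====
def Spec_compact_word (word : String) (out : String) : Prop := out = compact_word_alt word
instance (word : String) (out : String) : Decidable (Spec_compact_word word out) := by unfold Spec_compact_word; infer_instance

-- ===== CLAIM (what is proved, stated in full; the proofs are below) =====
def Claim_equal_compact_word : Prop := ∀ (word : String), Dom_compact_word word → Spec_compact_word word (compact_word word)

-- ===== LEMMAS AND PROOFS =====

-- A's result on a character list
def pvR (xs : List Char) : List Char :=
  pvGoA xs ((xs.reverse).filter (fun c => PySem.Chars.isalpha c))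

-- splitting pvGoA over an append: the tail consumes the letters left over by the head
theorem pvGoA_append (ws zs L : List Char) :
    pvGoA (ws ++ zs) L = pvGoA ws L ++ pvGoA zs (L.drop (ws.filter (fun c => PySem.Chars.isalpha c)).length) := by
  induction ws generalizing L with
  | nil => simp [pvGoA]
  | cons c cs ih =>
    by_cases h : PySem.Chars.isalpha c
    · cases L with
      | nil => simp [pvGoA, h, ih]
      | cons a L' => simp [pvGoA, h, ih]
    · simp [pvGoA, h, ih]

-- extra letters beyond those consumed do not matter
theorem pvGoA_ext (ws L ext : List Char)
    (h : (ws.filter (fun c => PySem.Chars.isalpha c)).length ≤ L.length) :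
    pvGoA ws (L ++ ext) = pvGoA ws L := by
  induction ws generalizing L with
  | nil => simp [pvGoA]
  | cons c cs ih =>
    by_cases hc : PySem.Chars.isalpha c
    · cases L with
      | nil => simp [hc] at h
      | cons a L' =>
        simp only [pvGoA, hc, if_pos, List.cons_append]
        simp [hc] at h
        simp [ih L' h]
    · simp only [hc, Bool.false_eq_true, not_false_iff, List.filter_cons_of_neg] at h
      simp [pvGoA, hc, ih L h]

theorem pvR_nil : pvR [] = [] := rfl

theorem pvR_single (c : Char) : pvR [c] = [c] := by
  by_cases h : PySem.Chars.isalpha c <;> simp [pvR, pvGoA, h]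

theorem pvR_cons_notalpha (c : Char) (zs : List Char) (h : PySem.Chars.isalpha c = false) :
    pvR (c :: zs) = c :: pvR zs := by
  simp [pvR, pvGoA, h]

theorem pvR_concat_notalpha (c d : Char) (ys : List Char)
    (_hc : PySem.Chars.isalpha c = true) (hd : PySem.Chars.isalpha d = false) :
    pvR (c :: (ys ++ [d])) = pvR (c :: ys) ++ [d] := by
  have h1 : (c :: (ys ++ [d])) = (c :: ys) ++ [d] := by simp
  rw [pvR, h1, pvGoA_append]
  have h2 : ((c :: ys) ++ [d]).reverse.filter (fun c => PySem.Chars.isalpha c)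
      = (c :: ys).reverse.filter (fun c => PySem.Chars.isalpha c) := by
    simp [hd]
  rw [h2]
  simp [pvGoA, hd, pvR]

theorem pvR_concat_alpha (c d : Char) (ys : List Char)
    (hc : PySem.Chars.isalpha c = true) (hd : PySem.Chars.isalpha d = true) :
    pvR (c :: (ys ++ [d])) = d :: pvR ys ++ [c] := by
  have hLrev : ((List.filter (fun c => PySem.Chars.isalpha c) ys).reverse).length
      = (ys.filter (fun c => PySem.Chars.isalpha c)).length := by
    rw [List.length_reverse]
  have h1 : (c :: (ys ++ [d])).reverse.filter (fun c => PySem.Chars.isalpha c)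
      = d :: (((ys.filter (fun c => PySem.Chars.isalpha c)).reverse) ++ [c]) := by
    simp [hd, hc, List.filter_reverse]
  rw [pvR, h1]
  simp only [pvGoA, hc, if_pos]
  rw [pvGoA_append]
  rw [List.drop_left' hLrev]
  have h3 : pvGoA ys ((ys.filter (fun c => PySem.Chars.isalpha c)).reverse ++ [c]) = pvR ys := by
    rw [pvGoA_ext, pvR, List.filter_reverse]
    rw [hLrev]
  rw [h3]
  simp [pvGoA, hd]

theorem pvLoopB_eq (n : Nat) (xs : List Char) (a m : Nat) (front back : List Char)
    (ham : a ≤ m) (hm : m ≤ xs.length) (hn : m - a ≤ n) :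
    pvLoopB xs (a : Int) ((m : Int) - 1) front back
      = front ++ pvR ((xs.drop a).take (m - a)) ++ back.reverse := by
  induction n generalizing a m front back with
  | zero =>
    have hma : m = a := by omega
    subst hma
    rw [pvLoopB]
    rw [dif_neg (by omega)]
    have : (m : Int) - 1 + 1 = (m : Int) := by ring
    rw [this, PySem.List.slice_natCast]
    simp [pvR_nil]
  | succ n ih =>
    rw [pvLoopB]
    by_cases hlt : (a : Int) < (m : Int) - 1
    · have ham2 : a + 1 < m := by omega
      have ha : a < xs.length := by omega
      have hm1 : m - 1 < xs.length := by omega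
      have hci : (PySem.List.pyGet? xs (a : Int)).getD ' ' = xs[a] := by
        simp [PySem.List.pyGet?_natCast, List.getElem?_eq_getElem ha]
      have hcj : (PySem.List.pyGet? xs ((m : Int) - 1)).getD ' ' = xs[m - 1] := by
        have : ((m : Int) - 1) = ((m - 1 : Nat) : Int) := by omega
        rw [this]
        simp [PySem.List.pyGet?_natCast, List.getElem?_eq_getElem hm1]
      have hsegi : ∀ (m' : Nat), a < m' → m' ≤ xs.length →
          (xs.drop a).take (m' - a) = xs[a] :: (xs.drop (a + 1)).take (m' - (a + 1)) := by
        intro m' h1 h2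
        rw [List.drop_eq_getElem_cons ha]
        rw [show m' - a = (m' - (a + 1)) + 1 by omega]
        rw [List.take_succ_cons]
      have hsegj : ∀ (a' : Nat), a' < m → m ≤ xs.length →
          (xs.drop a').take (m - a') = (xs.drop a').take ((m - 1) - a') ++ [xs[m - 1]] := by
        intro a' h1 h2
        rw [show m - a' = ((m - 1) - a') + 1 by omega, List.take_add_one]
        congr 1
        rw [List.getElem?_drop]
        rw [show a' + (m - 1 - a') = m - 1 by omega]
        simp [List.getElem?_eq_getElem hm1]
      rw [dif_pos hlt]
      simp only [hci, hcj]
      by_cases h1 : PySem.Chars.isalpha xs[a]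
      · by_cases h2 : PySem.Chars.isalpha xs[m - 1]
        · rw [if_neg (fun hn => hn h1), if_neg (fun hn => hn h2)]
          have e1 : (a : Int) + 1 = ((a + 1 : Nat) : Int) := by omega
          have e2 : (m : Int) - 1 - 1 = ((m - 1 : Nat) : Int) - 1 := by omega
          rw [e1, e2, ih (a + 1) (m - 1) (front ++ [xs[m - 1]]) (back ++ [xs[a]])
            (by omega) (by omega) (by omega)]
          rw [hsegi m (by omega) hm, hsegj (a + 1) (by omega) hm,
            pvR_concat_alpha xs[a] xs[m - 1] _ h1 h2]
          simp
        · rw [if_neg (fun hn => hn h1), if_pos h2]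
          have e2 : (m : Int) - 1 - 1 = ((m - 1 : Nat) : Int) - 1 := by omega
          rw [e2, ih a (m - 1) front (back ++ [xs[m - 1]]) (by omega) (by omega) (by omega)]
          rw [hsegi m (by omega) hm, hsegj (a + 1) (by omega) hm,
            pvR_concat_notalpha xs[a] xs[m - 1] _ h1 (by simpa using h2),
            ← hsegi (m - 1) (by omega) (by omega)]
          simp
      · rw [if_pos h1]
        have e1 : (a : Int) + 1 = ((a + 1 : Nat) : Int) := by omega
        rw [e1, ih (a + 1) m (front ++ [xs[a]]) back (by omega) hm (by omega)]
        rw [hsegi m (by omega) hm,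
          pvR_cons_notalpha xs[a] _ (by simpa using h1)]
        simp
    · rw [dif_neg hlt]
      have : (m : Int) - 1 + 1 = (m : Int) := by ring
      rw [this, PySem.List.slice_natCast]
      have hle : m - a ≤ 1 := by omega
      have hlen : ((xs.drop a).take (m - a)).length ≤ 1 := by
        simp [List.length_take]
        omega
      match hseg : (xs.drop a).take (m - a), hlen with
      | [], _ => rw [pvR_nil]
      | [c], _ => rw [pvR_single]

-- ===== VERDICT (by name: the statement is the Claim_ definition above) =====
theorem compact_word_spec : Claim_equal_compact_word := by
  intro word _
  show compact_word word = compact_word_alt word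
  unfold compact_word compact_word_alt
  have h := pvLoopB_eq word.toList.length word.toList 0 word.toList.length [] []
    (by omega) le_rfl le_rfl
  simp only [Nat.cast_zero] at h
  rw [h]
  simp only [List.drop_zero, Nat.sub_zero, List.take_length, List.nil_append,
    List.reverse_nil, List.append_nil, pvR]
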